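-- pv_equiv track=rewrite | github.com/COSC-499-W2025/capstone-project-team-13 | tests/intentionally_bad_code.py | nested_loops_b
-- ===== SOURCE A (Python) =====
-- def nested_loops_b(n):
--     total = 0
--     for i in range(n):
--         for j in range(n):
--             for k in range(n):
--                 for l in range(n):
--                     total += i + j + k + l
--     return total
-- ===== SOURCE B (Python) =====
-- def nested_loops_b(n):
--     m = n if n > 0 else 0
--     return 2 * m ** 4 * (m - 1)
-- ===== Notes on version B (the rewrite author's own statement) =====
-- stated objective: faster
-- what changed: Replaces the four nested loops by the closed form 2*m^4*(m-1) with m = max(n,0).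
import Mathlib
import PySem

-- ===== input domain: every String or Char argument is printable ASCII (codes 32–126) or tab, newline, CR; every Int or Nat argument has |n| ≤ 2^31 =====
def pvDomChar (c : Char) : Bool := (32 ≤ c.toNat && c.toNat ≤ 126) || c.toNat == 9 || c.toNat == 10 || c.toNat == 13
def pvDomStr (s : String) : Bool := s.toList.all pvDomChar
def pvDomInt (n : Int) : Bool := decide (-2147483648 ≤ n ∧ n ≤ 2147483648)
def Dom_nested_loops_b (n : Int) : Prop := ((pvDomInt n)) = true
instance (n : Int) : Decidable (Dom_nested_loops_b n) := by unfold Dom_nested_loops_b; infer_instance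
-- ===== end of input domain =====

-- B replaces A's four nested accumulation loops by the O(1) closed form 2*m^4*(m-1), m = max(n,0).

-- ===== PORT A =====
def nested_loops_b (n : Int) : Int :=
  (PySem.List.pyRange 0 n 1).foldl (fun total i =>
    (PySem.List.pyRange 0 n 1).foldl (fun total j =>
      (PySem.List.pyRange 0 n 1).foldl (fun total k =>
        (PySem.List.pyRange 0 n 1).foldl (fun total l =>
          total + (i + j + k + l)) total) total) total) 0

-- ===== PORT B =====
def nested_loops_b_alt (n : Int) : Int :=
  let m : Int := if n > 0 then n else 0
  2 * m ^ 4 * (m - 1)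

-- ===== PRECONDITION & SPEC =====
def Spec_nested_loops_b (n : Int) (out : Int) : Prop := out = nested_loops_b_alt n
instance (n : Int) (out : Int) : Decidable (Spec_nested_loops_b n out) := by unfold Spec_nested_loops_b; infer_instance

-- ===== CLAIM (what is proved, stated in full; the proofs are below) =====
def Claim_equal_nested_loops_b : Prop := ∀ (n : Int), Dom_nested_loops_b n → Spec_nested_loops_b n (nested_loops_b n)

-- ===== LEMMAS AND PROOFS =====

-- A fold that adds an affine function of each element.
theorem pvFoldlAffine (l : List Int) (p q : Int) :
    ∀ t : Int, l.foldl (fun t x => t + (p + q * x)) t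
      = t + (l.length : Int) * p + q * l.sum := by
  induction l with
  | nil => intro t; simp
  | cons a tl ih =>
      intro t
      simp only [List.foldl_cons, ih, List.length_cons, List.sum_cons]
      push_cast
      ring

-- Twice the sum of range(m) is m*(m-1) (Gauss, division-free).
theorem pvTwiceSumRange (m : Nat) :
    2 * ((List.range m).map (fun k : Nat => (k : Int))).sum = (m : Int) * ((m : Int) - 1) := by
  induction m with
  | zero => simp
  | succ m ih =>
      rw [List.range_succ, List.map_append, List.sum_append]
      simp only [List.map_cons, List.map_nil, List.sum_cons, List.sum_nil]
      push_cast
      push_cast at ih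
      linear_combination ih

-- The quadruple fold over any integer list in closed form.
theorem pvQuadFold (l : List Int) :
    l.foldl (fun total i =>
      l.foldl (fun total j =>
        l.foldl (fun total k =>
          l.foldl (fun total m => total + (i + j + k + m)) total) total) total) 0
    = 4 * (l.length : Int) ^ 3 * l.sum := by
  have e1 : (fun (total i : Int) =>
      l.foldl (fun total j =>
        l.foldl (fun total k =>
          l.foldl (fun total m => total + (i + j + k + m)) total) total) total)
      = (fun total i => total + ((3 * (l.length : Int) ^ 2 * l.sum) + (l.length : Int) ^ 3 * i)) := by
    funext t i
    have e2 : (fun (total j : Int) =>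
        l.foldl (fun total k =>
          l.foldl (fun total m => total + (i + j + k + m)) total) total)
        = (fun total j => total + (((l.length : Int) ^ 2 * i + 2 * (l.length : Int) * l.sum) + (l.length : Int) ^ 2 * j)) := by
      funext t j
      have e3 : (fun (total k : Int) =>
          l.foldl (fun total m => total + (i + j + k + m)) total)
          = (fun total k => total + (((l.length : Int) * (i + j) + l.sum) + (l.length : Int) * k)) := by
        funext t k
        have e4 : (fun (total m : Int) => total + (i + j + k + m))
            = (fun total m => total + ((i + j + k) + 1 * m)) := by
          funext t m; ring
        rw [e4, pvFoldlAffine]; ring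
      rw [e3, pvFoldlAffine]; ring
    rw [e2, pvFoldlAffine]; ring
  rw [e1, pvFoldlAffine]; ring

-- ===== VERDICT (by name: the statement is the Claim_ definition above) =====
theorem nested_loops_b_spec : Claim_equal_nested_loops_b := by
  intro n _
  unfold Spec_nested_loops_b nested_loops_b nested_loops_b_alt
  by_cases hn : n > 0
  · rw [pvQuadFold]
    have hlen : ((PySem.List.pyRange 0 n 1).length : Int) = n := by
      rw [PySem.List.length_pyRange_one]; omega
    have hsum : 2 * (PySem.List.pyRange 0 n 1).sum = n * (n - 1) := by
      rw [PySem.List.pyRange_one]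
      simp only [zero_add]
      rw [pvTwiceSumRange]
      have hcast : (((n - 0).toNat : Int)) = n := by omega
      rw [hcast]
    simp only [if_pos hn, hlen]
    linear_combination 2 * n ^ 3 * hsum
  · have hnil : PySem.List.pyRange 0 n 1 = [] :=
      PySem.List.pyRange_one_eq_nil (by omega)
    rw [hnil]
    simp [if_neg hn]
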